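-- pv_equiv track=rewrite | github.com/roonil-wazlib/Programming-Competition-Practice | test.py | find_vert
-- ===== SOURCE A (Python) =====
-- def find_vert(crossword):
--     vert_words = []
--     vert_indices = []
--     for x in range(len(crossword[-1])):
--         current_word = ""
--         for y in range(len(crossword)):
--             if crossword[y][x] != "@":
--                 current_word += crossword[y][x]
--                 if len(current_word) == 1:
--                     vert_indices.append((y, x))
--             else:
--                 if len(current_word) > 2:
--                     vert_words.append(current_word)
--                 elif len(current_word) != 0:
--                     vert_indices.pop()
--                 current_word = ""
--         if len(current_word) > 2:
--             vert_words.append(current_word)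
--         elif len(current_word) != 0:
--             vert_indices.pop()
--         current_word = ""
--
--     return vert_words, vert_indices
-- ===== SOURCE B (Python) =====
-- def find_vert(crossword):
--     words, indices = [], []
--     for x in range(len(crossword[-1])):
--         col = ''.join(row[x] for row in crossword)
--         n, y = len(col), 0
--         while y < n:
--             if col[y] == '@':
--                 y += 1
--             else:
--                 start = y
--                 while y < n and col[y] != '@':
--                     y += 1
--                 if y - start >= 3:
--                     words.append(col[start:y])
--                     indices.append((start, x))
--     return words, indices
-- ===== Notes on version B (the rewrite author's own statement) =====
-- stated objective: simpler
-- what changed: B extracts each column as a string and scans its maximal non-'@' runs directly (appending only runs of length >= 3), replacing A's char-by-char state machine with speculative index append-then-pop bookkeeping.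
import Mathlib
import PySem

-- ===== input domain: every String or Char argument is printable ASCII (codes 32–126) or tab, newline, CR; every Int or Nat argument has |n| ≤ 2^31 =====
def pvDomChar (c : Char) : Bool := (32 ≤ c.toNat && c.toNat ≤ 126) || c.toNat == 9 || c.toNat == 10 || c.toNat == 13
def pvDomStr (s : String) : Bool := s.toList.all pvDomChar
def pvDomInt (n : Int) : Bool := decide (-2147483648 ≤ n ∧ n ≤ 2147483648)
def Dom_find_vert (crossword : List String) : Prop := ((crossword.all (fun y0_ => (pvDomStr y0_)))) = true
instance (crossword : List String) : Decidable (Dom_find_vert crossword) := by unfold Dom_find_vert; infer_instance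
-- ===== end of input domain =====

-- B replaces A's char-by-char state machine (with speculative index append-then-pop) by a
-- per-column maximal-run scan that appends only qualifying runs; objective: simpler.

-- ===== PORT A =====
-- inner-loop body of A (one cell (y, c) of the current column x)
def stepA (x : Nat) (st : (List String × List (Int × Int)) × List Char) (yc : Nat × Char) :
    (List String × List (Int × Int)) × List Char :=
  if yc.2 ≠ '@' then
    let cur := st.2 ++ [yc.2]
    if cur.length = 1 then ((st.1.1, st.1.2 ++ [((yc.1 : Int), (x : Int))]), cur)
    else ((st.1.1, st.1.2), cur)
  else
    if 2 < st.2.length then ((st.1.1 ++ [String.mk st.2], st.1.2), [])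
    else if st.2 ≠ [] then ((st.1.1, st.1.2.dropLast), [])
    else ((st.1.1, st.1.2), [])

-- A's end-of-column flush of current_word
def flushA (st : (List String × List (Int × Int)) × List Char) : List String × List (Int × Int) :=
  if 2 < st.2.length then (st.1.1 ++ [String.mk st.2], st.1.2)
  else if st.2 ≠ [] then (st.1.1, st.1.2.dropLast)
  else st.1

def find_vert (crossword : List String) : List String × (List (Int × Int)) :=
  (List.range (crossword.getLastD "").toList.length).foldl
    (fun acc x =>
      flushA ((List.range crossword.length).foldl
        (fun st y => stepA x st (y, (crossword.getD y "").toList.getD x '@'))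
        (acc, [])))
    ([], [])

-- ===== PORT B =====
-- the maximal runs of non-'@' characters of a column, with their start indices (B's inner while loop)
def colRuns (col : List Char) (s : Nat) : List (Nat × List Char) :=
  match col with
  | [] => []
  | c :: cs =>
    if c = '@' then colRuns cs (s + 1)
    else (s, c :: cs.takeWhile (· ≠ '@')) ::
      colRuns (cs.dropWhile (· ≠ '@')) (s + 1 + (cs.takeWhile (· ≠ '@')).length)
termination_by col.length
decreasing_by
  · simp
  · simp only [List.length_cons]
    exact Nat.lt_succ_of_le (List.length_dropWhile_le _ cs)

def find_vert_alt (crossword : List String) : List String × (List (Int × Int)) :=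
  (List.range (crossword.getLastD "").toList.length).foldl
    (fun acc x =>
      let col := crossword.map (fun row => row.toList.getD x '@')
      let good := (colRuns col 0).filter (fun r => 3 ≤ r.2.length)
      (acc.1 ++ good.map (fun r => String.mk r.2),
       acc.2 ++ good.map (fun r => ((r.1 : Int), (x : Int)))))
    ([], [])

-- ===== PRECONDITION & SPEC =====
-- Pre_ excludes exactly the inputs on which Python A raises IndexError: the empty grid
-- (crossword[-1]) and ragged grids where some row is shorter than the (nonempty) last row.
def Pre_find_vert (crossword : List String) : Prop :=
  crossword ≠ [] ∧
    ((crossword.getLastD "").length = 0 ∨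
      ∀ s ∈ crossword, (crossword.getLastD "").length ≤ s.length)
instance (crossword : List String) : Decidable (Pre_find_vert crossword) := by
  unfold Pre_find_vert; infer_instance

def pvWitness_find_vert : List String := ["cat", "a@b", "t@c", "@@d"]

def Spec_find_vert (crossword : List String) (out : List String × (List (Int × Int))) : Prop := out = find_vert_alt crossword
instance (crossword : List String) (out : List String × (List (Int × Int))) : Decidable (Spec_find_vert crossword out) := by unfold Spec_find_vert; infer_instance

-- ===== CLAIM (what is proved, stated in full; the proofs are below) =====
def Claim_equal_find_vert : Prop := ∀ (crossword : List String), Dom_find_vert crossword → Pre_find_vert crossword → Spec_find_vert crossword (find_vert crossword)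

-- ===== LEMMAS AND PROOFS =====

-- column cells paired with their row indices, starting at row s
def idxPairs (col : List Char) (s : Nat) : List (Nat × Char) :=
  match col with
  | [] => []
  | c :: cs => (s, c) :: idxPairs cs (s + 1)

-- a possibly pending run (start index, chars so far) prepended to the runs of the rest of the column
def pendRuns (pend : Option (Nat × List Char)) (col : List Char) (s : Nat) :
    List (Nat × List Char) :=
  match pend with
  | none => colRuns col s
  | some (st, cur) =>
    (st, cur ++ col.takeWhile (· ≠ '@')) ::
      colRuns (col.dropWhile (· ≠ '@')) (s + (col.takeWhile (· ≠ '@')).length)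

def stateOf (x : Nat) (words : List String) (indices : List (Int × Int))
    (pend : Option (Nat × List Char)) : (List String × List (Int × Int)) × List Char :=
  match pend with
  | none => ((words, indices), [])
  | some (st, cur) => ((words, indices ++ [((st : Int), (x : Int))]), cur)

lemma range'_map_idxPairs (col : List Char) :
    ∀ (s : Nat) (cell : Nat → Char),
      (∀ i, i < col.length → cell (s + i) = col.getD i '@') →
      (List.range' s col.length).map (fun y => (y, cell y)) = idxPairs col s := by
  induction col with
  | nil => intro s cell _; simp [idxPairs]
  | cons c cs ih =>
    intro s cell h
    have h0 := h 0 (by simp)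
    have h0' : cell s = c := by simpa using h0
    simp only [List.length_cons, List.range'_succ, List.map_cons, idxPairs]
    rw [h0', ih (s + 1) cell (fun i hi => by
      have := h (i + 1) (by simpa using Nat.succ_lt_succ hi)
      simpa [Nat.add_comm, Nat.add_left_comm, Nat.add_assoc] using this)]

-- the central invariant: running A's inner loop from a (possibly pending) state and flushing
-- yields exactly the qualifying runs, as B computes them
lemma loop_runs (x : Nat) (col : List Char) :
    ∀ (s : Nat) (words : List String) (indices : List (Int × Int))
      (pend : Option (Nat × List Char)),
      (∀ st cur, pend = some (st, cur) → cur ≠ []) →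
      flushA ((idxPairs col s).foldl (stepA x) (stateOf x words indices pend)) =
        (words ++ ((pendRuns pend col s).filter (fun r => 3 ≤ r.2.length)).map
            (fun r => String.mk r.2),
         indices ++ ((pendRuns pend col s).filter (fun r => 3 ≤ r.2.length)).map
            (fun r => ((r.1 : Int), (x : Int)))) := by
  induction col with
  | nil =>
    intro s words indices pend hp
    cases pend with
    | none => simp [idxPairs, pendRuns, colRuns, stateOf, flushA]
    | some p =>
      obtain ⟨st, cur⟩ := p
      have hcur := hp st cur rfl
      simp only [idxPairs, List.foldl_nil, stateOf, flushA, pendRuns, List.takeWhile_nil,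
        List.dropWhile_nil, List.append_nil, colRuns, List.filter_cons]
      by_cases h3 : 2 < cur.length
      · have : (3 ≤ cur.length) = True := by simp; omega
        simp [h3, this]
      · have : (3 ≤ cur.length) = False := by simp; omega
        simp [h3, hcur, this]
  | cons c cs ih =>
    intro s words indices pend hp
    by_cases hc : c = '@'
    · cases pend with
      | none =>
        simp only [idxPairs, List.foldl_cons]
        have hstep : stepA x (stateOf x words indices none) (s, c) =
            stateOf x words indices none := by
          simp [stepA, stateOf, hc]
        rw [hstep, ih (s + 1) words indices none (by simp)]
        simp [pendRuns, colRuns, hc]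
      | some p =>
        obtain ⟨st, cur⟩ := p
        have hcur := hp st cur rfl
        simp only [idxPairs, List.foldl_cons]
        by_cases h3 : 2 < cur.length
        · have hstep : stepA x (stateOf x words indices (some (st, cur))) (s, c) =
              stateOf x (words ++ [String.mk cur]) (indices ++ [((st : Int), (x : Int))]) none := by
            simp [stepA, stateOf, hc, h3]
          rw [hstep, ih (s + 1) _ _ none (by simp)]
          have h3' : (3 ≤ cur.length) = True := by simp; omega
          simp [pendRuns, colRuns, hc, h3', List.append_assoc]
        · have hstep : stepA x (stateOf x words indices (some (st, cur))) (s, c) =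
              stateOf x words indices none := by
            simp [stepA, stateOf, hc, h3, hcur]
          rw [hstep, ih (s + 1) words indices none (by simp)]
          have h3' : (3 ≤ cur.length) = False := by simp; omega
          simp [pendRuns, colRuns, hc, h3']
    · cases pend with
      | none =>
        simp only [idxPairs, List.foldl_cons]
        have hstep : stepA x (stateOf x words indices none) (s, c) =
            stateOf x words indices (some (s, [c])) := by
          simp [stepA, stateOf, hc]
        rw [hstep, ih (s + 1) words indices (some (s, [c])) (by simp)]
        simp only [pendRuns, colRuns, hc]
        have : s + 1 + (cs.takeWhile (· ≠ '@')).length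
            = s + (1 + (cs.takeWhile (· ≠ '@')).length) := by omega
        simp
      | some p =>
        obtain ⟨st, cur⟩ := p
        have hcur := hp st cur rfl
        simp only [idxPairs, List.foldl_cons]
        have hstep : stepA x (stateOf x words indices (some (st, cur))) (s, c) =
            stateOf x words indices (some (st, cur ++ [c])) := by
          simp [stepA, stateOf, hc, hcur]
        rw [hstep, ih (s + 1) words indices (some (st, cur ++ [c])) (by simp)]
        have e2 : (s + 1) + (cs.takeWhile (fun x => !decide (x = '@'))).length =
            s + ((cs.takeWhile (fun x => !decide (x = '@'))).length + 1) := by omega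
        simp [pendRuns, hc, e2, List.append_assoc]

-- the two ports agree on every input (the Lean ports totalise missing cells with '@')
lemma ports_eq (crossword : List String) : find_vert crossword = find_vert_alt crossword := by
  unfold find_vert find_vert_alt
  apply PySem.List.foldl_congr_mem
  intro acc x _
  set col : List Char := crossword.map (fun row => row.toList.getD x '@') with hcol
  have hcell : ∀ i, i < crossword.length →
      (crossword.getD i "").toList.getD x '@' = col.getD i '@' := by
    intro i hi
    simp [hcol, List.getD, hi]
  have hlen : crossword.length = col.length := by simp [hcol]
  have hmap : (List.range crossword.length).map
      (fun y => (y, (crossword.getD y "").toList.getD x '@')) = idxPairs col 0 := by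
    rw [List.range_eq_range']
    have := range'_map_idxPairs col 0
      (fun y => (crossword.getD y "").toList.getD x '@')
      (fun i hi => by simpa using hcell i (by omega))
    rw [hlen]; simpa using this
  calc flushA ((List.range crossword.length).foldl
        (fun st y => stepA x st (y, (crossword.getD y "").toList.getD x '@')) (acc, []))
      = flushA ((idxPairs col 0).foldl (stepA x) (acc, [])) := by
        rw [← hmap, List.foldl_map]
    _ = _ := by
        have := loop_runs x col 0 acc.1 acc.2 none (by simp)
        simpa [stateOf, pendRuns] using this

-- ===== VERDICT (by name: the statement is the Claim_ definition above) =====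
theorem find_vert_spec : Claim_equal_find_vert := by
  intro crossword _ _
  unfold Spec_find_vert
  exact ports_eq crossword
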